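-- pv_equiv track=rewrite | github.com/Roeiazran/Codilty-Solutions | exercises/ThreeLetters.py | solution
-- ===== SOURCE A (Python) =====
-- def solution(A, B):
--
--     res = ""
--     if A > B:
--         while A > B and A - 2 > 0 and B > 0:
--             A -= 2
--             B -= 1
--             res += "aab"
--
--         # or A = B or A = B + 1 or A = B + 2
--         if A == B:
--             return res + "ab" * A
--
--         return res + "ab" * B + "a" * (A - B) # A = B + 1 or A = B + 2
--
--     elif B > A:
--         while B > A and B - 2 > 0 and A > 0:
--             B -= 2
--             A -= 1
--             res += "bba"
--
--         if A == B:
--             return res + "ab" * A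
--
--         return res + "ba" * A + "b" * (B - A)
--
--     else:
--         return "ab" * A
-- ===== SOURCE B (Python) =====
-- def solution(A, B):
--     if A > B:
--         k = max(0, min(A - B, (A - 1) // 2, B))
--         a, b = A - 2 * k, B - k
--         tail = "ab" * a if a == b else "ab" * b + "a" * (a - b)
--         return "aab" * k + tail
--     if B > A:
--         k = max(0, min(B - A, (B - 1) // 2, A))
--         a, b = A - k, B - 2 * k
--         tail = "ab" * a if a == b else "ba" * a + "b" * (b - a)
--         return "bba" * k + tail
--     return "ab" * A
-- ===== Notes on version B (the rewrite author's own statement) =====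
-- stated objective: faster
-- what changed: Replaces A's while-loops that append one 'aab'/'bba' block per iteration by a closed-form computation of the iteration count (max(0, min(A-B, (A-1)//2, B)) and symmetrically) followed by direct string multiplication.
import Mathlib
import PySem

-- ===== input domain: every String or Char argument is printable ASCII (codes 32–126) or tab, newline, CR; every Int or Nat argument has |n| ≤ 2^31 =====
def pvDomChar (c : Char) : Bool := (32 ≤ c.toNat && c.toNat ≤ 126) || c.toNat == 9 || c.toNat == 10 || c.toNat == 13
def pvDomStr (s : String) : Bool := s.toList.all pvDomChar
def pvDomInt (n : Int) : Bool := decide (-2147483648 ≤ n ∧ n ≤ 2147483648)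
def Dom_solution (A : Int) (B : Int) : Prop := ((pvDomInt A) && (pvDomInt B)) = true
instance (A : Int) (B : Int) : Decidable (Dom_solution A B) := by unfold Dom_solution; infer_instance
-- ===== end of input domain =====

-- B replaces A's quadratic character-by-character while-loops by a closed-form
-- iteration count and direct string repetition (objective: faster).

-- ===== PORT A =====
-- the 'while A > B and A - 2 > 0 and B > 0' loop, carrying res; B decreases by 1 each pass
def solLoopA (A B : Int) (res : List Char) : String :=
  if A > B ∧ A - 2 > 0 ∧ B > 0 then
    solLoopA (A - 2) (B - 1) (res ++ "aab".toList)
  else if A = B then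
    String.ofList (res ++ PySem.List.pyRepeat "ab".toList A)
  else
    String.ofList (res ++ PySem.List.pyRepeat "ab".toList B ++ PySem.List.pyRepeat "a".toList (A - B))
termination_by B.toNat
decreasing_by omega

-- the 'while B > A and B - 2 > 0 and A > 0' loop
def solLoopB (A B : Int) (res : List Char) : String :=
  if B > A ∧ B - 2 > 0 ∧ A > 0 then
    solLoopB (A - 1) (B - 2) (res ++ "bba".toList)
  else if A = B then
    String.ofList (res ++ PySem.List.pyRepeat "ab".toList A)
  else
    String.ofList (res ++ PySem.List.pyRepeat "ba".toList A ++ PySem.List.pyRepeat "b".toList (B - A))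
termination_by A.toNat
decreasing_by omega

def solution (A : Int) (B : Int) : String :=
  if A > B then solLoopA A B []
  else if B > A then solLoopB A B []
  else String.ofList (PySem.List.pyRepeat "ab".toList A)

-- ===== PORT B =====
def solution_alt (A : Int) (B : Int) : String :=
  if A > B then
    let k := max 0 (min (min (A - B) (PySem.Int.floordiv (A - 1) 2)) B)
    let a := A - 2 * k
    let b := B - k
    let tail := if a = b then PySem.List.pyRepeat "ab".toList a
                else PySem.List.pyRepeat "ab".toList b ++ PySem.List.pyRepeat "a".toList (a - b)
    String.ofList (PySem.List.pyRepeat "aab".toList k ++ tail)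
  else if B > A then
    let k := max 0 (min (min (B - A) (PySem.Int.floordiv (B - 1) 2)) A)
    let a := A - k
    let b := B - 2 * k
    let tail := if a = b then PySem.List.pyRepeat "ab".toList a
                else PySem.List.pyRepeat "ba".toList a ++ PySem.List.pyRepeat "b".toList (b - a)
    String.ofList (PySem.List.pyRepeat "bba".toList k ++ tail)
  else String.ofList (PySem.List.pyRepeat "ab".toList A)

-- ===== PRECONDITION & SPEC =====
def Spec_solution (A : Int) (B : Int) (out : String) : Prop := out = solution_alt A B
instance (A : Int) (B : Int) (out : String) : Decidable (Spec_solution A B out) := by unfold Spec_solution; infer_instance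

-- ===== CLAIM (what is proved, stated in full; the proofs are below) =====
def Claim_equal_solution : Prop := ∀ (A : Int) (B : Int), Dom_solution A B → Spec_solution A B (solution A B)

-- ===== LEMMAS AND PROOFS =====

-- the content solution_alt's A>B branch builds (proof-side mirror of that branch)
def altBodyA (A B : Int) : List Char :=
  let k := max 0 (min (min (A - B) (PySem.Int.floordiv (A - 1) 2)) B)
  let a := A - 2 * k
  let b := B - k
  let tail := if a = b then PySem.List.pyRepeat "ab".toList a
              else PySem.List.pyRepeat "ab".toList b ++ PySem.List.pyRepeat "a".toList (a - b)
  PySem.List.pyRepeat "aab".toList k ++ tail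

def altBodyB (A B : Int) : List Char :=
  let k := max 0 (min (min (B - A) (PySem.Int.floordiv (B - 1) 2)) A)
  let a := A - k
  let b := B - 2 * k
  let tail := if a = b then PySem.List.pyRepeat "ab".toList a
              else PySem.List.pyRepeat "ba".toList a ++ PySem.List.pyRepeat "b".toList (b - a)
  PySem.List.pyRepeat "bba".toList k ++ tail

lemma pyRepeat_pos {α : Type} (l : List α) {n : Int} (h : 0 < n) :
    PySem.List.pyRepeat l n = l ++ PySem.List.pyRepeat l (n - 1) := by
  simp only [PySem.List.pyRepeat]
  have : n.toNat = (n - 1).toNat + 1 := by omega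
  rw [this, List.replicate_succ, List.flatten_cons]

lemma pyRepeat_nonpos {α : Type} (l : List α) {n : Int} (h : n ≤ 0) :
    PySem.List.pyRepeat l n = [] := by
  simp only [PySem.List.pyRepeat]
  have : n.toNat = 0 := by omega
  simp [this]

-- closed-form k steps once with the loop body
lemma altBodyA_step (A B : Int) (h : A > B ∧ A - 2 > 0 ∧ B > 0) :
    altBodyA A B = "aab".toList ++ altBodyA (A - 2) (B - 1) := by
  obtain ⟨h1, h2, h3⟩ := h
  have hd : PySem.Int.floordiv (A - 1) 2 = (A - 1) / 2 :=
    PySem.Int.floordiv_eq_ediv_of_pos (by omega)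
  have hd' : PySem.Int.floordiv (A - 2 - 1) 2 = (A - 3) / 2 := by
    have e : A - 2 - 1 = A - 3 := by ring
    rw [e, PySem.Int.floordiv_eq_ediv_of_pos (by omega)]
  simp only [altBodyA, hd, hd']
  have hk : max 0 (min (min (A - B) ((A - 1) / 2)) B)
      = max 0 (min (min (A - 2 - (B - 1)) ((A - 3) / 2)) (B - 1)) + 1 := by omega
  rw [hk]
  have hpos : (0:Int) < max 0 (min (min (A - 2 - (B - 1)) ((A - 3) / 2)) (B - 1)) + 1 := by omega
  rw [pyRepeat_pos _ hpos]
  simp only [add_sub_cancel_right, List.append_assoc]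
  congr 2; ring_nf

lemma altBodyA_exit (A B : Int) (hge : A ≥ B) (h : ¬(A > B ∧ A - 2 > 0 ∧ B > 0)) :
    altBodyA A B =
      (if A = B then PySem.List.pyRepeat "ab".toList A
       else PySem.List.pyRepeat "ab".toList B ++ PySem.List.pyRepeat "a".toList (A - B)) := by
  have hd : PySem.Int.floordiv (A - 1) 2 ≤ max 0 (A - 2) := by
    rw [PySem.Int.floordiv_eq_ediv_of_pos (by omega)]; omega
  have hk : max 0 (min (min (A - B) (PySem.Int.floordiv (A - 1) 2)) B) = 0 := by
    omega
  simp only [altBodyA, hk]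
  rw [pyRepeat_nonpos _ (le_refl 0)]
  simp only [mul_zero, sub_zero, List.nil_append]

lemma solLoopA_eq (A B : Int) (res : List Char) (hge : A ≥ B) :
    solLoopA A B res = String.ofList (res ++ altBodyA A B) := by
  induction A, B, res using solLoopA.induct with
  | case1 A B res h ih =>
    rw [solLoopA, if_pos h, ih (by omega), altBodyA_step A B h]
    simp [List.append_assoc]
  | case2 B res h =>
    rw [solLoopA, if_neg h, if_pos rfl, altBodyA_exit B B (le_refl B) h, if_pos rfl]
  | case3 A B res h hne =>
    rw [solLoopA, if_neg h, if_neg hne, altBodyA_exit A B hge h, if_neg hne]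
    simp [List.append_assoc]

lemma altBodyB_step (A B : Int) (h : B > A ∧ B - 2 > 0 ∧ A > 0) :
    altBodyB A B = "bba".toList ++ altBodyB (A - 1) (B - 2) := by
  obtain ⟨h1, h2, h3⟩ := h
  have hd : PySem.Int.floordiv (B - 1) 2 = (B - 1) / 2 :=
    PySem.Int.floordiv_eq_ediv_of_pos (by omega)
  have hd' : PySem.Int.floordiv (B - 2 - 1) 2 = (B - 3) / 2 := by
    have e : B - 2 - 1 = B - 3 := by ring
    rw [e, PySem.Int.floordiv_eq_ediv_of_pos (by omega)]
  simp only [altBodyB, hd, hd']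
  have hk : max 0 (min (min (B - A) ((B - 1) / 2)) A)
      = max 0 (min (min (B - 2 - (A - 1)) ((B - 3) / 2)) (A - 1)) + 1 := by omega
  rw [hk]
  have hpos : (0:Int) < max 0 (min (min (B - 2 - (A - 1)) ((B - 3) / 2)) (A - 1)) + 1 := by omega
  rw [pyRepeat_pos _ hpos]
  simp only [add_sub_cancel_right, List.append_assoc]
  congr 2; ring_nf

lemma altBodyB_exit (A B : Int) (hge : B ≥ A) (h : ¬(B > A ∧ B - 2 > 0 ∧ A > 0)) :
    altBodyB A B =
      (if A = B then PySem.List.pyRepeat "ab".toList A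
       else PySem.List.pyRepeat "ba".toList A ++ PySem.List.pyRepeat "b".toList (B - A)) := by
  have hd : PySem.Int.floordiv (B - 1) 2 ≤ max 0 (B - 2) := by
    rw [PySem.Int.floordiv_eq_ediv_of_pos (by omega)]; omega
  have hk : max 0 (min (min (B - A) (PySem.Int.floordiv (B - 1) 2)) A) = 0 := by
    omega
  simp only [altBodyB, hk]
  rw [pyRepeat_nonpos _ (le_refl 0)]
  simp only [mul_zero, sub_zero, List.nil_append]

lemma solLoopB_eq (A B : Int) (res : List Char) (hge : B ≥ A) :
    solLoopB A B res = String.ofList (res ++ altBodyB A B) := by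
  induction A, B, res using solLoopB.induct with
  | case1 A B res h ih =>
    rw [solLoopB, if_pos h, ih (by omega), altBodyB_step A B h]
    simp [List.append_assoc]
  | case2 B res h =>
    rw [solLoopB, if_neg h, if_pos rfl, altBodyB_exit B B (le_refl B) h, if_pos rfl]
  | case3 A B res h hne =>
    rw [solLoopB, if_neg h, if_neg hne, altBodyB_exit A B hge h, if_neg hne]
    simp [List.append_assoc]

-- ===== VERDICT (by name: the statement is the Claim_ definition above) =====
theorem solution_spec : Claim_equal_solution := by
  intro A B _
  unfold Spec_solution solution solution_alt
  by_cases h1 : A > B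
  · rw [if_pos h1, if_pos h1, solLoopA_eq A B [] (by omega)]
    simp [altBodyA]
  · rw [if_neg h1, if_neg h1]
    by_cases h2 : B > A
    · rw [if_pos h2, if_pos h2, solLoopB_eq A B [] (by omega)]
      simp [altBodyB]
    · rw [if_neg h2, if_neg h2]
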